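-- pv_equiv track=rewrite | github.com/hashirventhodi/ai-driven-real-time-console | nlp/query_understanding.py | build_combined_context
-- ===== SOURCE A (Python) =====
-- from typing import Tuple, Dict, List
--
-- def build_combined_context(
--     current_query: str,
--     conversation_history: List[str],
--     max_messages: int = 3
-- ) -> str:
--     """
--     Combine the last few messages, ignoring repeated identical lines
--     that might confuse the LLM.
--     """
--     if not conversation_history:
--         conversation_history = []
--
--     # Deduplicate or remove repeated lines if they are identical
--     filtered_history = []
--     for msg in reversed(conversation_history):
--         if msg not in filtered_history:
--             filtered_history.append(msg)
--         # If it's repeated text, skip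
--     # We'll then take the last `max_messages` from the filtered reversed list
--     filtered_history = list(reversed(filtered_history))[-max_messages:]
--
--     history_text = "\n".join(filtered_history)
--     # Add current user query
--     combined = f"{history_text}\nUser Query: {current_query}"
--     return combined.strip()
-- ===== SOURCE B (Python) =====
-- def build_combined_context(
--     current_query: str,
--     conversation_history,
--     max_messages: int = 3
-- ) -> str:
--     """Same result via a single forward comprehension: keep a message iff it
--     does not occur again later (last-occurrence dedup without any reversal)."""
--     if not conversation_history:
--         conversation_history = []
--     deduped = [msg for i, msg in enumerate(conversation_history)
--                if msg not in conversation_history[i + 1:]]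
--     history_text = "\n".join(deduped[-max_messages:])
--     return f"{history_text}\nUser Query: {current_query}".strip()
-- ===== Notes on version B (the rewrite author's own statement) =====
-- stated objective: simpler
-- what changed: Replaces A's reversed-iteration dedup with an accumulator followed by a double reverse by a single forward comprehension that keeps each message iff it does not occur again later in the list; slice, join and strip are unchanged.
import Mathlib
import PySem

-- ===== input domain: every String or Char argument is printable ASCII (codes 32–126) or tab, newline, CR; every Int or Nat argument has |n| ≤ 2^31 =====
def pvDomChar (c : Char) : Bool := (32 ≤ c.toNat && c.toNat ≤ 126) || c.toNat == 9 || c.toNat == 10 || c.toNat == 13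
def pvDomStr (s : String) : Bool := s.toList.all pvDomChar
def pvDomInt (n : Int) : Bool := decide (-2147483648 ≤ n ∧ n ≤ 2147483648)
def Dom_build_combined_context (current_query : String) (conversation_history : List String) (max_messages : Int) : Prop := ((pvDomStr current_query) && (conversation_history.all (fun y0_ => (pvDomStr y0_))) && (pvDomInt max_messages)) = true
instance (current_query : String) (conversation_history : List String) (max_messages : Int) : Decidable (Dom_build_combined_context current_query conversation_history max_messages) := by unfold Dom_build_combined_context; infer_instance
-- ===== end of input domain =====

-- B replaces A's reversed-accumulator dedup (+ double reverse) by a single forward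
-- comprehension keeping each message iff it does not occur again later (objective: simpler).

-- ===== PORT A =====
def build_combined_context (current_query : String) (conversation_history : List String) (max_messages : Int) : String :=
  -- `if not conversation_history: conversation_history = []` — a no-op for a list argument
  let conversation_history := if conversation_history = [] then [] else conversation_history
  -- for msg in reversed(conversation_history): if msg not in filtered_history: append
  let filtered_history := conversation_history.reverse.foldl
    (fun acc msg => if msg ∈ acc then acc else acc ++ [msg]) []
  -- filtered_history = list(reversed(filtered_history))[-max_messages:]
  let filtered_history := PySem.List.slice filtered_history.reverse (some (-max_messages)) none
  let history_text := PySem.Str.join "\n" filtered_history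
  PySem.Str.strip (history_text ++ "\nUser Query: " ++ current_query)

-- ===== PORT B =====
def build_combined_context_alt (current_query : String) (conversation_history : List String) (max_messages : Int) : String :=
  let conversation_history' := if conversation_history = [] then [] else conversation_history
  -- [msg for i, msg in enumerate(h) if msg not in h[i+1:]]
  let deduped := ((PySem.List.enumerate conversation_history' 0).filter
    (fun p => !(decide (p.2 ∈ PySem.List.slice conversation_history' (some (p.1 + 1)) none)))).map
    (fun p => p.2)
  let history_text := PySem.Str.join "\n" (PySem.List.slice deduped (some (-max_messages)) none)
  PySem.Str.strip (history_text ++ "\nUser Query: " ++ current_query)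

-- ===== PRECONDITION & SPEC =====
def Spec_build_combined_context (current_query : String) (conversation_history : List String) (max_messages : Int) (out : String) : Prop := out = build_combined_context_alt current_query conversation_history max_messages
instance (current_query : String) (conversation_history : List String) (max_messages : Int) (out : String) : Decidable (Spec_build_combined_context current_query conversation_history max_messages out) := by unfold Spec_build_combined_context; infer_instance

-- ===== CLAIM (what is proved, stated in full; the proofs are below) =====
def Claim_equal_build_combined_context : Prop := ∀ (current_query : String) (conversation_history : List String) (max_messages : Int), Dom_build_combined_context current_query conversation_history max_messages → Spec_build_combined_context current_query conversation_history max_messages (build_combined_context current_query conversation_history max_messages)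

-- ===== LEMMAS AND PROOFS =====

/-- Reference dedup: keep an element iff it does not occur again later. -/
def dedupLast : List String → List String
  | [] => []
  | m :: r => if m ∈ r then dedupLast r else m :: dedupLast r

theorem mem_dedupLast (a : String) (l : List String) : a ∈ dedupLast l ↔ a ∈ l := by
  induction l with
  | nil => simp [dedupLast]
  | cons m r ih =>
    simp only [dedupLast]
    by_cases h : m ∈ r
    · simp [h, ih]
      intro hx; rw [hx] at ih ⊢; simp [ih, h]
    · simp [h, ih]

/-- A's side: reversed-accumulator dedup, then reverse, equals `dedupLast`. -/
theorem a_side (l : List String) :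
    (l.reverse.foldl (fun acc msg => if msg ∈ acc then acc else acc ++ [msg]) []).reverse
      = dedupLast l := by
  induction l with
  | nil => rfl
  | cons m r ih =>
    have hm : m ∈ r.reverse.foldl (fun acc msg => if msg ∈ acc then acc else acc ++ [msg]) []
        ↔ m ∈ r := by
      rw [← List.mem_reverse, ih, mem_dedupLast]
    rw [List.reverse_cons, List.foldl_append, List.foldl_cons, List.foldl_nil]
    by_cases h : m ∈ r
    · rw [if_pos (hm.mpr h), ih, dedupLast, if_pos h]
    · rw [if_neg (fun hc => h (hm.mp hc)), List.reverse_append, dedupLast, if_neg h]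
      rw [ih]; rfl

/-- B's side: the enumerate/filter comprehension equals `dedupLast`, for any suffix. -/
theorem b_side (full : List String) : ∀ (t : List String) (k : Nat), full.drop k = t →
    (((PySem.List.enumerate t (k : Int)).filter
        (fun p => !(decide (p.2 ∈ PySem.List.slice full (some (p.1 + 1)) none)))).map
      (fun p => p.2)) = dedupLast t := by
  intro t
  induction t with
  | nil => intro k _; simp [PySem.List.enumerate_nil, dedupLast]
  | cons m r ih =>
    intro k hk
    have hdrop : full.drop (k + 1) = r := by
      rw [← List.drop_drop, hk]; rfl
    have hslice : PySem.List.slice full (some ((k : Int) + 1)) none = r := by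
      have hc : (k : Int) + 1 = ((k + 1 : Nat) : Int) := by push_cast; ring
      rw [hc, PySem.List.slice_from_natCast, hdrop]
    have htail := ih (k + 1) hdrop
    have hc : ((k + 1 : Nat) : Int) = (k : Int) + 1 := by push_cast; ring
    rw [hc] at htail
    rw [PySem.List.enumerate_cons, List.filter_cons]
    by_cases h : m ∈ r
    · simp only [hslice, h, decide_true, Bool.not_true, Bool.false_eq_true, if_false,
        htail, dedupLast, if_true]
    · simp only [hslice, h, decide_false, Bool.not_false, if_true, List.map_cons,
        htail, dedupLast, if_false]

-- ===== VERDICT (by name: the statement is the Claim_ definition above) =====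
theorem build_combined_context_spec : Claim_equal_build_combined_context := by
  intro q h m _
  show build_combined_context q h m = build_combined_context_alt q h m
  unfold build_combined_context build_combined_context_alt
  have hb := b_side (if h = [] then [] else h) (if h = [] then [] else h) 0 rfl
  simp only [Nat.cast_zero] at hb
  simp only [a_side, hb]
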